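-- pv_equiv track=rewrite | github.com/AdrienCarthoblaz/Master-Thesis | Package/facebook_sub_readers/comment_standard.py | drop_nesteddictionary_fb_comment
-- ===== SOURCE A (Python) =====
-- def drop_nesteddictionary_fb_comment(alist):
--     outputdict = {}
--     for lis in alist:
--         for dic in lis:
--             for key, value in dic.items():
--                 if isinstance(value,dict):
--                     for k2, v2 in value.items():
--                         outputdict[k2] = outputdict.get(k2, []) + [v2]
--     outputdict.pop('group',None)
--     return outputdict
-- ===== SOURCE B (Python) =====
-- def drop_nesteddictionary_fb_comment(alist):
--     # Flatten every nested dict's items into one ordered pair list.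
--     pairs = [p for lis in alist for dic in lis for value in dic.values()
--              if isinstance(value, dict) for p in value.items()]
--     # Distinct keys in first-occurrence order, then one scan per key.
--     keys = list(dict.fromkeys(k for k, _ in pairs))
--     return {k: [v for k2, v in pairs if k2 == k] for k in keys if k != 'group'}
-- ===== Notes on version B (the rewrite author's own statement) =====
-- stated objective: alternative
-- what changed: B never maintains a dict while scanning: it flattens all nested-dict items into one pair list, dedups the keys in first-occurrence order, and builds each output entry by an independent per-key filter over the flat pair list, instead of A's fused nested loop that grows per-key lists inside a mutable dict via get-and-concatenate.
import Mathlib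
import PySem

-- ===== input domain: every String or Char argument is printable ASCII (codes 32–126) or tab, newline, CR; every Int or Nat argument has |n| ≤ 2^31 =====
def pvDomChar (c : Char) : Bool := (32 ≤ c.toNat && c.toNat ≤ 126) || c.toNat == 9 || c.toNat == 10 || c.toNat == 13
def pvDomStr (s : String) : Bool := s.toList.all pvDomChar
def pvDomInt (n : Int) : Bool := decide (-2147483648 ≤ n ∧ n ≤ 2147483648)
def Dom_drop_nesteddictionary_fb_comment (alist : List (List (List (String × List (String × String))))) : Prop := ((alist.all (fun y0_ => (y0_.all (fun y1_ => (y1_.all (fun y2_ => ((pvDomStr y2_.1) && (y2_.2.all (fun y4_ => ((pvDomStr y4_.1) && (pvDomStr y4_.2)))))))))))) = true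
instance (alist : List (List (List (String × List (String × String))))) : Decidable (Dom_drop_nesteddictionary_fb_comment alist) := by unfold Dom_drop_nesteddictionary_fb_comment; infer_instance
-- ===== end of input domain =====

-- B is dict-free: it flattens the nested-dict items into one pair list, dedups keys in
-- first-occurrence order and builds each entry by a per-key scan (objective: alternative).

-- ===== PORT A =====
-- the fused loop: for each inner (key, value) pair, outputdict[k2] = outputdict.get(k2, []) + [v2]
-- (isinstance(value, dict) is always true under the stated type)
def drop_nesteddictionary_fb_comment (alist : List (List (List (String × List (String × String))))) : List (String × List String) :=
  let outputdict : PySem.Dict String (List String) :=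
    alist.foldl (fun od lis =>
      lis.foldl (fun od dic =>
        dic.foldl (fun od kv =>
          kv.2.foldl (fun od p => od.insert p.1 (od.getD p.1 [] ++ [p.2])) od) od) od)
      PySem.Dict.empty
  (outputdict.erase "group").items  -- outputdict.pop('group', None); return outputdict

-- ===== PORT B =====
def drop_nesteddictionary_fb_comment_alt (alist : List (List (List (String × List (String × String))))) : List (String × List String) :=
  -- pairs = [p for lis in alist for dic in lis for value in dic.values() for p in value.items()]
  let pairs : List (String × String) :=
    alist.flatMap (fun lis => lis.flatMap (fun dic => dic.flatMap (fun kv => kv.2)))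
  -- keys = list(dict.fromkeys(k for k, _ in pairs))
  let keys : List String := PySem.Set.ofList (pairs.map Prod.fst)
  -- {k: [v for k2, v in pairs if k2 == k] for k in keys if k != 'group'}
  (keys.filter (fun k => !(k == "group"))).map
    (fun k => (k, (pairs.filter (fun p => p.1 == k)).map Prod.snd))

-- ===== PRECONDITION & SPEC =====
def Spec_drop_nesteddictionary_fb_comment (alist : List (List (List (String × List (String × String))))) (out : List (String × List String)) : Prop := out = drop_nesteddictionary_fb_comment_alt alist
instance (alist : List (List (List (String × List (String × String))))) (out : List (String × List String)) : Decidable (Spec_drop_nesteddictionary_fb_comment alist out) := by unfold Spec_drop_nesteddictionary_fb_comment; infer_instance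

-- ===== CLAIM =====
def Claim_equal_drop_nesteddictionary_fb_comment : Prop := ∀ (alist : List (List (List (String × List (String × String))))), Dom_drop_nesteddictionary_fb_comment alist → Spec_drop_nesteddictionary_fb_comment alist (drop_nesteddictionary_fb_comment alist)

-- ===== LEMMAS AND PROOFS =====

-- A's fused step written as Dict.modify.
theorem pvStep_eq : (fun (od : PySem.Dict String (List String)) (p : String × String) =>
    od.insert p.1 (od.getD p.1 [] ++ [p.2]))
    = fun od p => od.modify p.1 [] (· ++ [p.2]) := by
  funext od p; simp [PySem.Dict.modify]

-- ===== VERDICT =====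
theorem drop_nesteddictionary_fb_comment_spec : Claim_equal_drop_nesteddictionary_fb_comment := by
  intro alist _
  show drop_nesteddictionary_fb_comment alist = drop_nesteddictionary_fb_comment_alt alist
  unfold drop_nesteddictionary_fb_comment drop_nesteddictionary_fb_comment_alt
  rw [pvStep_eq]
  set pairs : List (String × String) :=
    alist.flatMap (fun lis => lis.flatMap (fun dic => dic.flatMap (fun kv => kv.2))) with hpairs
  -- A's nested foldl is the foldl over the flattened pair list
  have hfold : alist.foldl (fun od lis =>
      lis.foldl (fun od dic =>
        dic.foldl (fun od kv =>
          kv.2.foldl (fun (od : PySem.Dict String (List String)) p => od.modify p.1 [] (· ++ [p.2])) od) od) od)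
      PySem.Dict.empty
      = pairs.foldl (fun od p => od.modify p.1 [] (· ++ [p.2])) PySem.Dict.empty := by
    rw [hpairs]; simp only [List.foldl_flatMap]
  rw [hfold]
  set d := pairs.foldl (fun (od : PySem.Dict String (List String)) p => od.modify p.1 [] (· ++ [p.2])) PySem.Dict.empty with hd
  have hkeys : d.keys = PySem.Set.ofList (pairs.map Prod.fst) := by
    rw [hd, PySem.Dict.keys_foldl_modify_key pairs Prod.fst [] (fun _ p => (· ++ [p.2]))]
    simp [PySem.Dict.keys_empty, PySem.Set.update_nil_left]
  have hnodup : d.keys.Nodup := by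
    rw [hd]
    exact PySem.Dict.nodup_keys_foldl_modify_key pairs Prod.fst [] (fun _ p => (· ++ [p.2]))
      PySem.Dict.empty (by simp [PySem.Dict.keys_empty])
  have hgetD : ∀ k, d.getD k [] = (pairs.filter (fun p => p.1 == k)).map Prod.snd := by
    intro k
    rw [hd, PySem.Dict.getD_foldl_modify_append]
    simp [PySem.Dict.getD_empty]
  have hitems : d.items = d.keys.map (fun k => (k, d.getD k [])) :=
    PySem.Dict.items_eq_map_keys d hnodup []
  show (d.erase "group").items = _
  rw [show (d.erase "group").items = d.items.filter (fun p => !(p.1 == "group")) from rfl]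
  rw [hitems, List.filter_map, hkeys]
  apply List.map_congr_left
  intro k _
  rw [hgetD]
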